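-- pv_equiv track=rewrite | github.com/ShuaiZhao/jvet-hls-browser | scripts/generate_connections.py | _has_similar_suffix
-- ===== SOURCE A (Python) =====
-- def _has_similar_suffix(str1: str, str2: str, min_len: int = 5) -> bool:
--     """Check if two strings share a common suffix."""
--     suffix_len = 0
--     for c1, c2 in zip(reversed(str1), reversed(str2)):
--         if c1 == c2:
--             suffix_len += 1
--         else:
--             break
--     return suffix_len >= min_len
-- ===== SOURCE B (Python) =====
-- def _has_similar_suffix(str1: str, str2: str, min_len: int = 5) -> bool:
--     """Check if two strings share a common suffix."""
--     if min_len <= 0: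
--         return True
--     return len(str1) >= min_len and str1[-min_len:] == str2[-min_len:]
-- ===== Notes on version B (the rewrite author's own statement) =====
-- stated objective: simpler
-- what changed: Replaced the character-by-character suffix-counting loop with a single fixed-length slice comparison: True iff min_len <= 0, or both strings are long enough and their last min_len characters coincide.
import Mathlib
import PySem

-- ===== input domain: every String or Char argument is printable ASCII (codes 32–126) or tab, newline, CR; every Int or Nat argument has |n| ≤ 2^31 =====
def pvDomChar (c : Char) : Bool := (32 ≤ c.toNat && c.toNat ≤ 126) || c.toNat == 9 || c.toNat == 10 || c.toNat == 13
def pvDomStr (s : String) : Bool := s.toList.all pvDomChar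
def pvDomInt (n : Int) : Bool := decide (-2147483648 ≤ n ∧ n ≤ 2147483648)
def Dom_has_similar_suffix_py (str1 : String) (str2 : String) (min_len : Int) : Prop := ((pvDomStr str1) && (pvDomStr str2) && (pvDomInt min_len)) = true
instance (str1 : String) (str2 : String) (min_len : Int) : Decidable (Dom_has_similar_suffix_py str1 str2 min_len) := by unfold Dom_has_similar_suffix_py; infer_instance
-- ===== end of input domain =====

-- B replaces A's suffix-counting loop with one fixed-length slice comparison (objective: simpler).


-- ===== PORT A =====
-- the for-loop over zip(reversed(str1), reversed(str2)) with its break, carrying suffix_len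
def pvSuffixLoop (acc : Nat) : List (Char × Char) → Nat
  | [] => acc
  | (c1, c2) :: rest => if c1 == c2 then pvSuffixLoop (acc + 1) rest else acc

def has_similar_suffix_py (str1 : String) (str2 : String) (min_len : Int) : Bool :=
  let suffix_len := pvSuffixLoop 0 (str1.toList.reverse.zip str2.toList.reverse)
  decide ((suffix_len : Int) ≥ min_len)

-- ===== PORT B =====
def has_similar_suffix_py_alt (str1 : String) (str2 : String) (min_len : Int) : Bool :=
  if min_len ≤ 0 then true
  else decide ((str1.toList.length : Int) ≥ min_len) &&
       decide (PySem.List.slice str1.toList (some (-min_len)) none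
             = PySem.List.slice str2.toList (some (-min_len)) none)

-- ===== PRECONDITION & SPEC =====
def Spec_has_similar_suffix_py (str1 : String) (str2 : String) (min_len : Int) (out : Bool) : Prop := out = has_similar_suffix_py_alt str1 str2 min_len
instance (str1 : String) (str2 : String) (min_len : Int) (out : Bool) : Decidable (Spec_has_similar_suffix_py str1 str2 min_len out) := by unfold Spec_has_similar_suffix_py; infer_instance

-- ===== CLAIM (what is proved, stated in full; the proofs are below) =====
def Claim_equal_has_similar_suffix_py : Prop := ∀ (str1 : String) (str2 : String) (min_len : Int), Dom_has_similar_suffix_py str1 str2 min_len → Spec_has_similar_suffix_py str1 str2 min_len (has_similar_suffix_py str1 str2 min_len)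

-- ===== LEMMAS AND PROOFS =====

-- common-prefix length of two lists (proof-side characterisation of A's loop)
def pvCpl : List Char → List Char → Nat
  | a :: as, b :: bs => if a = b then pvCpl as bs + 1 else 0
  | _, _ => 0

theorem pvSuffixLoop_eq_cpl (l1 : List Char) (l2 : List Char) (acc : Nat) :
    pvSuffixLoop acc (l1.zip l2) = acc + pvCpl l1 l2 := by
  induction l1 generalizing l2 acc with
  | nil => simp [pvSuffixLoop, pvCpl]
  | cons a as ih =>
      cases l2 with
      | nil => simp [pvSuffixLoop, pvCpl]
      | cons b bs =>
          by_cases h : a = b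
          · simp [pvSuffixLoop, pvCpl, h, ih]; omega
          · simp [pvSuffixLoop, pvCpl, h]

theorem pvCpl_le_left (l1 : List Char) (l2 : List Char) : pvCpl l1 l2 ≤ l1.length := by
  induction l1 generalizing l2 with
  | nil => simp [pvCpl]
  | cons a as ih =>
      cases l2 with
      | nil => simp [pvCpl]
      | cons b bs =>
          by_cases h : a = b
          · simp [pvCpl, h]; exact ih bs
          · simp [pvCpl, h]

theorem pvCpl_le_right (l1 : List Char) (l2 : List Char) : pvCpl l1 l2 ≤ l2.length := by
  induction l1 generalizing l2 with
  | nil => simp [pvCpl]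
  | cons a as ih =>
      cases l2 with
      | nil => simp [pvCpl]
      | cons b bs =>
          by_cases h : a = b
          · simp [pvCpl, h]; exact ih bs
          · simp [pvCpl, h]

theorem pvCpl_char (l1 : List Char) (l2 : List Char) (m : Nat) (hm : 0 < m) :
    (m ≤ pvCpl l1 l2) ↔ (l1.take m = l2.take m ∧ m ≤ l1.length ∧ m ≤ l2.length) := by
  induction l1 generalizing l2 m with
  | nil => simp [pvCpl]; omega
  | cons a as ih =>
      cases l2 with
      | nil => simp [pvCpl]; omega
      | cons b bs =>
          by_cases h : a = b
          · subst h
            rcases Nat.eq_or_lt_of_le hm with h1 | h1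
            · simp [pvCpl, ← h1]
            · have hm' : 0 < m - 1 := by omega
              have := ih bs (m - 1) hm'
              obtain ⟨k, rfl⟩ : ∃ k, m = k + 1 := ⟨m - 1, by omega⟩
              simp only [Nat.add_sub_cancel] at this
              simp [pvCpl, List.take_succ_cons, this]
          · simp [pvCpl, h]
            constructor
            · omega
            · rintro ⟨htake, -, -⟩
              obtain ⟨k, rfl⟩ : ∃ k, m = k + 1 := ⟨m - 1, by omega⟩
              simp [List.take_succ_cons] at htake
              exact absurd htake.1 h

theorem pvDrop_eq_rev_take (l : List Char) (m : Nat) :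
    l.drop (l.length - m) = (l.reverse.take m).reverse := by
  rw [List.take_reverse, List.reverse_reverse]

-- ===== VERDICT (by name: the statement is the Claim_ definition above) =====
theorem has_similar_suffix_py_spec : Claim_equal_has_similar_suffix_py := by
  intro str1 str2 min_len _
  unfold Spec_has_similar_suffix_py has_similar_suffix_py has_similar_suffix_py_alt
  set l1 := str1.toList with hl1
  set l2 := str2.toList with hl2
  rw [pvSuffixLoop_eq_cpl]
  simp only [Nat.zero_add]
  by_cases h0 : min_len ≤ 0
  · simp [h0]
    omega
  · simp only [h0, if_false]
    have h0' : 0 < min_len := by omega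
    obtain ⟨m, rfl⟩ : ∃ m : Nat, min_len = (m : Int) :=
      ⟨min_len.toNat, (Int.toNat_of_nonneg (le_of_lt h0')).symm⟩
    have hm : 0 < m := by exact_mod_cast h0'
    rw [PySem.List.slice_from_neg_natCast l1 m hm, PySem.List.slice_from_neg_natCast l2 m hm]
    by_cases hlen1 : m ≤ l1.length
    · by_cases hlen2 : m ≤ l2.length
      · have hchar := pvCpl_char l1.reverse l2.reverse m hm
        simp only [List.length_reverse] at hchar
        have hAiff : (m ≤ pvCpl l1.reverse l2.reverse) ↔
            l1.reverse.take m = l2.reverse.take m := by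
          rw [hchar]; simp [hlen1, hlen2]
        rw [pvDrop_eq_rev_take l1 m, pvDrop_eq_rev_take l2 m]
        simp [ge_iff_le, hAiff, List.reverse_inj, hlen1]
      · -- A: the common suffix is at most |str2| < m;  B: the slices have different lengths
        have hA : ¬ (m ≤ pvCpl l1.reverse l2.reverse) := by
          have := pvCpl_le_right l1.reverse l2.reverse
          simp only [List.length_reverse] at this
          omega
        have hB : l1.drop (l1.length - m) ≠ l2.drop (l2.length - m) := by
          intro hEq
          have := congrArg List.length hEq
          simp only [List.length_drop] at this
          omega
        simp [hA, hB]
    · have hA : ¬ (m ≤ pvCpl l1.reverse l2.reverse) := by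
        have := pvCpl_le_left l1.reverse l2.reverse
        simp only [List.length_reverse] at this
        omega
      have hB : ¬ ((m : Int) ≤ (l1.length : Int)) := by exact_mod_cast hlen1
      simp [hA, hB]
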